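-- pv_equiv track=rewrite | github.com/check-check-check/pycharm_project1 | teaching/散列类型/字符串类型案例1.py | two2_string
-- ===== SOURCE A (Python) =====
-- def two2_string(str):
--     s = {}  # 创建字典
--     for i in str:
--         if i in s.keys():
--             s[i] += 1
--         else:
--             s[i] = 1
--     return [i for i in s if s[i] == 2]
-- ===== SOURCE B (Python) =====
-- def two2_string(str):
--     out = []
--     rest = list(str)
--     while rest:
--         c = rest[0]
--         remaining = [x for x in rest if x != c]
--         if len(rest) - len(remaining) == 2:
--             out.append(c)
--         rest = remaining
--     return out
-- ===== Notes on version B (the rewrite author's own statement) =====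
-- stated objective: alternative
-- what changed: Replaces A's one-pass frequency dict with a shrinking-worklist loop: repeatedly take the first remaining character, delete all its occurrences from the worklist, and keep it when the length dropped by exactly 2; no frequency table is maintained.
import Mathlib
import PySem

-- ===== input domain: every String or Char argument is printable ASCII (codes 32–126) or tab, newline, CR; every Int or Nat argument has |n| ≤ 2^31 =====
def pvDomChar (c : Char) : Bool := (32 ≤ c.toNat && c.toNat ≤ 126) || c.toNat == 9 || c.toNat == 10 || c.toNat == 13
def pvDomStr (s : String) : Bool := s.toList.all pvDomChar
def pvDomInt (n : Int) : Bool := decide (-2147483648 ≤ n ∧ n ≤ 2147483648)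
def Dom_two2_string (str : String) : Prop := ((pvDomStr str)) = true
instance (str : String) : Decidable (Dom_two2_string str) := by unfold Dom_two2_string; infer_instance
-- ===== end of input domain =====

-- B replaces A's frequency dict with a shrinking-worklist loop: repeatedly take the first
-- remaining character, delete all its occurrences, and keep it when exactly two were deleted
-- (alternative decomposition, not faster).

-- ===== PORT A =====
def two2_string (str : String) : List String :=
  let s : PySem.Dict Char Int :=
    str.toList.foldl
      (fun d i => if d.contains i then d.insert i (d.getD i 0 + 1) else d.insert i 1)
      PySem.Dict.empty
  (s.keys.filter (fun i => s.getD i 0 == 2)).map Char.toString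

-- ===== PORT B =====
-- the 'while rest:' loop of Source B as recursion on the shrinking worklist
def two2Go : List Char → List String
  | [] => []
  | c :: t =>
    let remaining := (c :: t).filter (fun x => x != c)
    (if ((c :: t).length : Int) - (remaining.length : Int) == 2 then [c.toString] else [])
      ++ two2Go remaining
termination_by l => l.length
decreasing_by
  simp only [List.filter_cons, bne_self_eq_false, List.length_cons]
  exact Nat.lt_succ_of_le (List.length_filter_le _ _)

def two2_string_alt (str : String) : List String := two2Go str.toList

-- ===== PRECONDITION & SPEC =====
def Spec_two2_string (str : String) (out : List String) : Prop := out = two2_string_alt str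
instance (str : String) (out : List String) : Decidable (Spec_two2_string str out) := by unfold Spec_two2_string; infer_instance

-- ===== CLAIM (what is proved, stated in full; the proofs are below) =====
def Claim_equal_two2_string : Prop := ∀ (str : String), Dom_two2_string str → Spec_two2_string str (two2_string str)

-- ===== LEMMAS AND PROOFS =====

-- A's fold is exactly Counter(xs): the else-branch inserts 1 = getD+1 on a fresh key.
lemma foldA_eq_counter (l : List Char) :
    l.foldl (fun d i => if d.contains i then d.insert i (d.getD i 0 + 1) else d.insert i 1)
      PySem.Dict.empty = PySem.Dict.counter l := by
  rw [← PySem.Dict.foldl_insert_getD_add_one_eq_counter]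
  apply PySem.List.foldl_congr_mem
  intro d x _
  by_cases h : d.contains x
  · simp [h]
  · rw [if_neg (by simp [h]), PySem.Dict.getD_of_not_contains d 0 (by simpa using h)]
    norm_num

-- folding Set.add over a list ignores occurrences of an element already in the accumulator
lemma foldl_add_filter_mem (c : Char) (l : List Char) (s : PySem.Set Char) (hc : c ∈ s) :
    l.foldl PySem.Set.add s = (l.filter (fun x => x != c)).foldl PySem.Set.add s := by
  induction l generalizing s with
  | nil => rfl
  | cons a t ih =>
    by_cases ha : a = c
    · subst ha
      have : PySem.Set.add s a = s := by
        simp [PySem.Set.add, PySem.Set.contains, hc]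
      simp [this, ih s hc]
    · simp only [List.filter_cons, bne_iff_ne, ne_eq, ha, not_false_eq_true, if_pos,
        List.foldl_cons]
      exact ih _ (by simp [PySem.Set.mem_add, hc])

-- a head element absent from the tail stays in front of the fold
lemma foldl_add_cons_notmem (c : Char) (l : List Char) (s : PySem.Set Char)
    (h : ∀ x ∈ l, x ≠ c) :
    l.foldl PySem.Set.add (c :: s) = c :: l.foldl PySem.Set.add s := by
  induction l generalizing s with
  | nil => rfl
  | cons a t ih =>
    have ha : a ≠ c := h a (List.mem_cons_self)
    have hadd : PySem.Set.add (c :: s) a = c :: PySem.Set.add s a := by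
      simp [PySem.Set.add, PySem.Set.contains, ha]
      split <;> simp
    rw [List.foldl_cons, hadd, List.foldl_cons, ih _ (fun x hx => h x (List.mem_cons_of_mem _ hx))]

-- first-occurrence dedup unfolds like B's worklist: head, then dedup of the head-free tail
lemma ofList_cons_filter (c : Char) (t : List Char) :
    PySem.Set.ofList (c :: t) = c :: PySem.Set.ofList (t.filter (fun x => x != c)) := by
  have h0 : PySem.Set.ofList (c :: t) = t.foldl PySem.Set.add [c] := by
    simp [PySem.Set.ofList_eq_foldl, PySem.Set.add, PySem.Set.contains]
  rw [h0, foldl_add_filter_mem c t [c] (by simp),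
      foldl_add_cons_notmem c _ [] (by intro x hx; simpa using (List.mem_filter.mp hx).2),
      PySem.Set.ofList_eq_foldl]

-- B's worklist loop computes: distinct chars in first-occurrence order whose count is 2
lemma two2Go_eq (l : List Char) :
    two2Go l = ((PySem.Set.ofList l).filter (fun c => ((l.count c : Int)) == 2)).map Char.toString := by
  induction l using two2Go.induct with
  | case1 => simp [two2Go, PySem.Set.ofList]
  | case2 c t remaining ih =>
    have hrem : remaining = t.filter (fun x => x != c) := by
      simp [remaining]
    have hcount' : ∀ l : List Char, List.count c l + (l.filter (fun x => x != c)).length = l.length := by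
      intro l
      induction l with
      | nil => simp
      | cons a s ihs =>
        by_cases ha : a = c
        · subst ha
          simp only [List.count_cons_self, List.filter_cons, bne_self_eq_false,
            Bool.false_eq_true, if_false, List.length_cons]
          omega
        · rw [List.filter_cons, if_pos (by simpa using ha), List.length_cons,
              List.count_cons_of_ne ha]
          simp only [List.length_cons]
          omega
    have hcount : (c :: t).count c + remaining.length = (c :: t).length := by
      rw [hrem, List.count_cons_self, List.length_cons]
      have := hcount' t
      omega
    rw [two2Go]
    show (if ((c :: t).length : Int) - (remaining.length : Int) == 2 then [c.toString] else [])
        ++ two2Go remaining = _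
    rw [ofList_cons_filter, ← hrem, List.filter_cons, ih]
    have hcond : (((c :: t).length : Int) - (remaining.length : Int) == 2)
        = (((c :: t).count c : Int) == 2) := by
      rw [Bool.eq_iff_iff]
      simp only [beq_iff_eq]
      omega
    have htail : (PySem.Set.ofList remaining).filter (fun x => ((remaining.count x : Int)) == 2)
        = (PySem.Set.ofList remaining).filter (fun x => (((c :: t).count x : Int)) == 2) := by
      apply List.filter_congr
      intro x hx
      have hxmem : x ∈ remaining := by simpa [PySem.Set.mem_ofList] using hx
      have hxc : x ≠ c := by
        rw [hrem] at hxmem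
        simpa using (List.mem_filter.mp hxmem).2
      have : remaining.count x = (c :: t).count x := by
        rw [hrem, List.count_filter (by simpa using hxc), List.count_cons_of_ne (Ne.symm hxc)]
      rw [this]
    rw [htail, hcond]
    simp only [List.count_cons_self, Nat.cast_add, Nat.cast_one]
    by_cases h : (List.count c t : Int) + 1 = 2
    · simp [h, Char.toString]
    · simp [h]

-- ===== VERDICT (by name: the statement is the Claim_ definition above) =====
theorem two2_string_spec : Claim_equal_two2_string := by
  intro str _
  unfold Spec_two2_string two2_string two2_string_alt
  rw [foldA_eq_counter, two2Go_eq]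
  simp only [PySem.Dict.keys_counter, PySem.Dict.getD_counter]
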